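-- pv_equiv track=rewrite | github.com/griffinkerr212/Kerr-EGR-101 | Python Exam/pythonTestheader.py | funTranslate
-- ===== SOURCE A (Python) =====
-- def funTranslate(enText, eng_Dict):             #Does not work
--     ansList = [] #Empty list to populate
--     ansString = "" #Empty string to populate
--     for s in enText: #For strings in enText
--         for i in s: #For characters in string
--             if i in eng_Dict.values(): #If characer is a value
--                 for key, value in eng_Dict.items(): #For key,value in the dictionary
--                     if i == value: #if character equals the value
--                         ansString += key #Add the string to the answer
--     ansList.append(ansString) #Append the strings into the list
--     return ansList #Return the list
-- ===== SOURCE B (Python) =====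
-- def funTranslate(enText, eng_Dict):
--     # Dict-major scatter: index every position of the joined text by its character,
--     # then make ONE pass over the dictionary, scattering each key into the positions
--     # that hold its value; finally join the per-position buckets.
--     text = "".join(enText)
--     positions = {}
--     for idx, c in enumerate(text):
--         positions.setdefault(c, []).append(idx)
--     parts = [""] * len(text)
--     for key, value in eng_Dict.items():
--         for idx in positions.get(value, ()):
--             parts[idx] += key
--     return ["".join(parts)]
-- ===== Notes on version B (the rewrite author's own statement) =====
-- stated objective: faster
-- what changed: B is dict-major instead of A's char-major: it builds an index from each character to its positions in the joined text, then makes a single pass over the dictionary scattering each key into the positions that hold its value, and joins the per-position buckets; A instead scans the whole dict (values() membership plus an items() loop) for every character.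
import Mathlib
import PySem

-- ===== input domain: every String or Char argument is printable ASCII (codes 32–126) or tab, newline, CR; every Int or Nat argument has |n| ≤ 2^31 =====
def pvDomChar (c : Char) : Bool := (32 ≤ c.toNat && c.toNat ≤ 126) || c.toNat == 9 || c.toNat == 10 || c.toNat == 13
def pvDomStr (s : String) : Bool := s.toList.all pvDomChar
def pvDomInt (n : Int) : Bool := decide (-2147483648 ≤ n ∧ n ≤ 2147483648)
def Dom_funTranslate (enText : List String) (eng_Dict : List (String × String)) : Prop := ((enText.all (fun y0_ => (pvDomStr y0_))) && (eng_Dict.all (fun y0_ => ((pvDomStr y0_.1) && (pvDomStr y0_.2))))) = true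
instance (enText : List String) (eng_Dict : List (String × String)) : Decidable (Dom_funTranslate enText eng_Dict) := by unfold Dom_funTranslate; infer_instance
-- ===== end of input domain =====

-- B is dict-major: it indexes the positions of each character of the joined text once, then makes
-- ONE pass over the dictionary scattering each key into the positions holding its value, instead
-- of A's char-major per-character scans of the whole dict; same return value for every input.
-- ===== PORT A =====
def funTranslate (enText : List String) (eng_Dict : List (String × String)) : List String :=
  let d := PySem.Dict.ofList eng_Dict
  let ansString : List Char :=
    enText.foldl (fun acc s =>
      s.toList.foldl (fun acc i =>
        if d.values.contains (String.ofList [i]) then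
          d.items.foldl (fun acc kv =>
            if String.ofList [i] == kv.2 then acc ++ kv.1.toList else acc) acc
        else acc) acc) []
  [String.ofList ansString]

-- ===== PORT B =====
def funTranslate_alt (enText : List String) (eng_Dict : List (String × String)) : List String :=
  let d := PySem.Dict.ofList eng_Dict
  -- text = "".join(enText)
  let text : List Char := enText.flatMap String.toList
  -- for idx, c in enumerate(text): positions.setdefault(c, []).append(idx)
  -- (enumerate's indices are 0..len-1, all nonnegative, so Nat indices via zipIdx are exact)
  let positions : PySem.Dict String (List Nat) :=
    text.zipIdx.foldl (fun ps ci => ps.modify (String.ofList [ci.1]) [] (· ++ [ci.2])) PySem.Dict.empty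
  -- parts = [""] * len(text); for key, value in d.items(): for idx in positions.get(value, ()): parts[idx] += key
  let parts : List (List Char) :=
    d.items.foldl (fun parts kv =>
        (positions.getD kv.2 []).foldl
          (fun parts idx => parts.set idx (parts.getD idx [] ++ kv.1.toList)) parts)
      (List.replicate text.length [])
  [String.ofList parts.flatten]

-- ===== PRECONDITION & SPEC =====
def Spec_funTranslate (enText : List String) (eng_Dict : List (String × String)) (out : List String) : Prop := out = funTranslate_alt enText eng_Dict
instance (enText : List String) (eng_Dict : List (String × String)) (out : List String) : Decidable (Spec_funTranslate enText eng_Dict out) := by unfold Spec_funTranslate; infer_instance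

-- ===== CLAIM (what is proved, stated in full; the proofs are below) =====
def Claim_equal_funTranslate : Prop := ∀ (enText : List String) (eng_Dict : List (String × String)), Dom_funTranslate enText eng_Dict → Spec_funTranslate enText eng_Dict (funTranslate enText eng_Dict)

-- ===== LEMMAS AND PROOFS =====

-- the translation of one character: all keys of the dict whose value is that character, in order
def pvG (d : PySem.Dict String String) (c : Char) : List Char :=
  (d.items.filter (fun kv => String.ofList [c] == kv.2)).flatMap (fun kv => kv.1.toList)

-- ---- A side ----

-- A's inner items() loop appends exactly the keys whose value equals v, in order.
theorem pvInnerA (v : String) (l : List (String × String)) (acc : List Char) :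
    l.foldl (fun acc kv => if v == kv.2 then acc ++ kv.1.toList else acc) acc
      = acc ++ (l.filter (fun kv => v == kv.2)).flatMap (fun kv => kv.1.toList) := by
  induction l generalizing acc with
  | nil => simp
  | cons kv t ih =>
    rw [List.foldl_cons]
    cases hb : (v == kv.2) <;> rw [ih] <;> simp [hb]

-- When v is not among the values, no item matches.
theorem pvNoMatch (d : PySem.Dict String String) (v : String)
    (h : d.values.contains v = false) :
    d.items.filter (fun kv => v == kv.2) = [] := by
  rw [List.filter_eq_nil_iff]
  intro kv hkv hb
  have hv : kv.2 ∈ d.values := by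
    simp only [PySem.Dict.values]
    exact List.mem_map_of_mem hkv
  have : v = kv.2 := by simpa using hb
  subst this
  simp [List.contains_eq_mem, hv] at h

theorem pvASide (enText : List String) (d : PySem.Dict String String) :
    enText.foldl (fun acc s =>
      s.toList.foldl (fun acc i =>
        if d.values.contains (String.ofList [i]) then
          d.items.foldl (fun acc kv =>
            if String.ofList [i] == kv.2 then acc ++ kv.1.toList else acc) acc
        else acc) acc) []
    = (enText.flatMap String.toList).flatMap (pvG d) := by
  have hstep : ∀ (acc : List Char) (i : Char),
      (if d.values.contains (String.ofList [i]) then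
          d.items.foldl (fun acc kv =>
            if String.ofList [i] == kv.2 then acc ++ kv.1.toList else acc) acc
        else acc) = acc ++ pvG d i := by
    intro acc i
    unfold pvG
    by_cases hg : d.values.contains (String.ofList [i])
    · rw [if_pos hg, pvInnerA]
    · rw [if_neg hg, pvNoMatch d _ (by simpa using hg)]
      simp
  simp only [hstep, PySem.List.foldl_append_eq_flatMap, List.nil_append]
  simp [List.flatMap_assoc]

-- ---- B side ----

-- the index list B's positions dict holds at v
def pvIdxs (text : List Char) (v : String) : List Nat :=
  (text.zipIdx.filter (fun ci => String.ofList [ci.1] == v)).map (·.2)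

-- positions characterization
theorem pvPositions (text : List Char) (v : String) :
    (text.zipIdx.foldl (fun ps ci => ps.modify (String.ofList [ci.1]) [] (· ++ [ci.2]))
        PySem.Dict.empty).getD v []
      = pvIdxs text v := by
  have := List.foldl_map (f := fun ci : Char × Nat => (String.ofList [ci.1], ci.2))
    (g := fun (ps : PySem.Dict String (List Nat)) (p : String × Nat) => ps.modify p.1 [] (· ++ [p.2]))
    (l := text.zipIdx) (init := PySem.Dict.empty)
  rw [← this, PySem.Dict.getD_foldl_modify_append]
  simp [pvIdxs, List.filter_map, Function.comp_def]

theorem pvZipSnd (text : List Char) (k : Nat) :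
    (text.zipIdx k).map (·.2) = List.range' k text.length := by
  induction text generalizing k with
  | nil => simp
  | cons c t ih => simp [List.zipIdx_cons, ih, List.range'_succ]

theorem pvIdxs_nodup (text : List Char) (v : String) : (pvIdxs text v).Nodup := by
  have hsub : List.Sublist (pvIdxs text v) ((text.zipIdx 0).map (·.2)) :=
    List.Sublist.map _ (List.filter_sublist)
  rw [pvZipSnd] at hsub
  exact hsub.nodup List.nodup_range'

theorem pvIdxs_lt (text : List Char) (v : String) (i : Nat) (h : i ∈ pvIdxs text v) :
    i < text.length := by
  unfold pvIdxs at h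
  obtain ⟨ci, hci, rfl⟩ := List.mem_map.mp h
  have := List.mem_zipIdx (List.mem_filter.mp hci).1
  omega

theorem pvIdxs_mem (text : List Char) (v : String) (i : Nat) (hi : i < text.length) :
    (i ∈ pvIdxs text v) ↔ String.ofList [text[i]] = v := by
  unfold pvIdxs
  constructor
  · intro h
    obtain ⟨ci, hci, rfl⟩ := List.mem_map.mp h
    obtain ⟨hmem, hv⟩ := List.mem_filter.mp hci
    obtain ⟨-, -, hc⟩ := List.mem_zipIdx hmem
    simp only [Nat.sub_zero] at hc
    rw [← hc]
    simpa using hv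
  · intro h
    refine List.mem_map.mpr ⟨(text[i], i), List.mem_filter.mpr ⟨?_, by simpa using h⟩, rfl⟩
    have hlt : i < (text.zipIdx 0).length := by simpa using hi
    have : (text.zipIdx 0)[i] = (text[i], 0 + i) := List.getElem_zipIdx hlt
    rw [Nat.zero_add] at this
    exact this ▸ List.getElem_mem hlt
theorem pvGetD_set {α : Type} (l : List α) (i : Nat) (v : α) (j : Nat) (d : α) :
    (l.set i v).getD j d = if j = i ∧ i < l.length then v else l.getD j d := by
  simp only [List.getD_eq_getElem?_getD, List.getElem?_set]
  split_ifs with h1 h2 h3 h4 <;> simp_all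

theorem pvScatter (pos : List Nat) (parts : List (List Char)) (ks : List Char)
    (hnd : pos.Nodup) (hlt : ∀ i ∈ pos, i < parts.length) :
    (pos.foldl (fun parts idx => parts.set idx (parts.getD idx [] ++ ks)) parts).length
        = parts.length
    ∧ ∀ j, (pos.foldl (fun parts idx => parts.set idx (parts.getD idx [] ++ ks)) parts).getD j []
        = if j ∈ pos then parts.getD j [] ++ ks else parts.getD j [] := by
  induction pos generalizing parts with
  | nil => simp
  | cons i pos ih =>
    rw [List.foldl_cons]
    set parts' := parts.set i (parts.getD i [] ++ ks) with hp
    have hlen' : parts'.length = parts.length := by simp [hp]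
    have hni : i ∉ pos := (List.nodup_cons.mp hnd).1
    obtain ⟨ihl, ihg⟩ := ih parts' (List.nodup_cons.mp hnd).2
      (fun x hx => hlen' ▸ hlt x (List.mem_cons_of_mem _ hx))
    refine ⟨ihl.trans hlen', fun j => ?_⟩
    rw [ihg j]
    have hset := pvGetD_set parts i (parts.getD i [] ++ ks) j []
    by_cases hji : j = i
    · subst hji
      rw [if_neg hni, if_pos List.mem_cons_self, ← hp] at *
      rw [hset, if_pos ⟨rfl, hlt j List.mem_cons_self⟩]
    · rw [← hp] at hset
      rw [if_neg (fun h : j = i ∧ i < parts.length => hji h.1)] at hset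
      rw [hset]
      simp only [List.mem_cons, hji, false_or]
theorem pvBInv (text : List Char) (l : List (String × String)) (parts : List (List Char))
    (hlen : parts.length = text.length) :
    (l.foldl (fun parts kv =>
        (pvIdxs text kv.2).foldl
          (fun parts idx => parts.set idx (parts.getD idx [] ++ kv.1.toList)) parts) parts).length
        = text.length
    ∧ ∀ j, j < text.length →
      (l.foldl (fun parts kv =>
        (pvIdxs text kv.2).foldl
          (fun parts idx => parts.set idx (parts.getD idx [] ++ kv.1.toList)) parts) parts).getD j []
        = parts.getD j []
            ++ (l.filter (fun kv => String.ofList [text.getD j ' '] == kv.2)).flatMap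
                 (fun kv => kv.1.toList) := by
  induction l generalizing parts with
  | nil => exact ⟨hlen, fun j _ => by simp⟩
  | cons kv t ih =>
    rw [List.foldl_cons]
    obtain ⟨sl, sg⟩ := pvScatter (pvIdxs text kv.2) parts kv.1.toList
      (pvIdxs_nodup text kv.2) (fun i hi => hlen ▸ pvIdxs_lt text kv.2 i hi)
    obtain ⟨ihl, ihg⟩ := ih _ (sl.trans hlen)
    refine ⟨ihl, fun j hj => ?_⟩
    rw [ihg j hj, sg j]
    have hgd : text.getD j ' ' = text[j] := List.getD_eq_getElem text ' ' hj
    rw [List.filter_cons]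
    by_cases hm : String.ofList [text[j]] = kv.2
    · rw [if_pos ((pvIdxs_mem text kv.2 j hj).mpr hm)]
      have : (String.ofList [text.getD j ' '] == kv.2) = true := by rw [hgd]; simp [hm]
      rw [this]
      simp
    · rw [if_neg (fun h => hm ((pvIdxs_mem text kv.2 j hj).mp h))]
      have : (String.ofList [text.getD j ' '] == kv.2) = false := by rw [hgd]; simp [hm]
      rw [this]
      simp

theorem pvBSide (text : List Char) (d : PySem.Dict String String) :
    (d.items.foldl (fun parts kv =>
        (pvIdxs text kv.2).foldl
          (fun parts idx => parts.set idx (parts.getD idx [] ++ kv.1.toList)) parts)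
      (List.replicate text.length [])).flatten
    = text.flatMap (pvG d) := by
  obtain ⟨hl, hg⟩ := pvBInv text d.items (List.replicate text.length []) (by simp)
  have hmap : (d.items.foldl (fun parts kv =>
        (pvIdxs text kv.2).foldl
          (fun parts idx => parts.set idx (parts.getD idx [] ++ kv.1.toList)) parts)
      (List.replicate text.length [])) = text.map (pvG d) := by
    apply List.ext_getElem (by rw [hl, List.length_map])
    intro j h1 h2
    have hj : j < text.length := by simpa using h2
    have hgj := hg j hj
    rw [List.getD_eq_getElem _ _ h1] at hgj
    have hgd : text.getD j ' ' = text[j] := List.getD_eq_getElem text ' ' hj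
    rw [hgd] at hgj
    rw [hgj, List.getElem_map]
    simp [pvG]
  rw [hmap, ← List.flatMap_def]
theorem funTranslate_spec : Claim_equal_funTranslate := by
  intro enText eng_Dict hDom
  clear hDom
  unfold Spec_funTranslate funTranslate funTranslate_alt
  simp only []
  rw [pvASide enText (PySem.Dict.ofList eng_Dict)]
  have hpos : ∀ v, ((enText.flatMap String.toList).zipIdx.foldl
      (fun ps ci => ps.modify (String.ofList [ci.1]) [] (· ++ [ci.2])) PySem.Dict.empty).getD v []
      = pvIdxs (enText.flatMap String.toList) v := fun v => pvPositions _ v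
  simp only [hpos]
  rw [pvBSide (enText.flatMap String.toList) (PySem.Dict.ofList eng_Dict)]
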